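-- pv_equiv track=rewrite | github.com/scc103766/LIVENESS_DETECTION | archive_20240320_flash_liveness/ThunderGuard/tg_process/tg_process.py | fill_frame_line_list
-- ===== SOURCE A (Python) =====
-- def fill_frame_line_list(frame_line_list, target_len):
--     if len(frame_line_list) == 5:
--         new_frame_line_list = []
--         scale = target_len // 5
--         offset = (target_len - scale * 5) >> 1
--         for i in range(5):
--             cur_scale = scale
--             if i == 0:
--                 cur_scale = scale + offset
--             elif i == 4:
--                 cur_scale = target_len - len(new_frame_line_list)
--             for j in range(cur_scale):
--                 new_frame_line_list.append(frame_line_list[i])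
--         return new_frame_line_list
--     return frame_line_list
-- ===== SOURCE B (Python) =====
-- def fill_frame_line_list(frame_line_list, target_len):
--     if len(frame_line_list) != 5:
--         return frame_line_list
--     scale = target_len // 5
--     offset = (target_len - scale * 5) >> 1
--     bounds = [scale + offset, 2 * scale + offset, 3 * scale + offset, 4 * scale + offset]
--     return [frame_line_list[sum(b <= k for b in bounds)]
--             for k in range(target_len)]
-- ===== Notes on version B (the rewrite author's own statement) =====
-- stated objective: alternative
-- what changed: Replaces A's per-source-element nested repeat loops (with running-length arithmetic for the last bucket) by a single per-output-position pass that maps each position k to its source bucket via the cumulative boundary list [s+o, 2s+o, 3s+o, 4s+o].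
-- intended difference: On 5-element lists with target_len == -1, A returns a one-element list holding the first frame (a leftover of its offset arithmetic: scale=-1, offset=2 makes the first bucket size 1), while B returns [], the intended output for a non-positive requested length (A itself returns [] for every other negative target_len). — e.g. on fill_frame_line_list([7, 1, 2, 3, 4], -1): A returns [7], B returns []
import Mathlib
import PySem

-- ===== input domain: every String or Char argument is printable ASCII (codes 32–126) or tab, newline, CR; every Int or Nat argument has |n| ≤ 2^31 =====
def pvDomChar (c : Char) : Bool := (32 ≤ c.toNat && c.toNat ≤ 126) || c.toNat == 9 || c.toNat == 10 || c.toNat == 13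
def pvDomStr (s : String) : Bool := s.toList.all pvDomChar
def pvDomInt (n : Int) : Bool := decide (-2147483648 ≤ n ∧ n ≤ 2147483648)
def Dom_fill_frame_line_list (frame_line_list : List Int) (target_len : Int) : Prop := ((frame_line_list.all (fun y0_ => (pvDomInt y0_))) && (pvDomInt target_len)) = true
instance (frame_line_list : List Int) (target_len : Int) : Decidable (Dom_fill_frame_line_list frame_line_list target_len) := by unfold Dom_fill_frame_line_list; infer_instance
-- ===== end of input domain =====

-- B replaces A's per-source-bucket repeat loops by a single per-position bucket lookup via a
-- cumulative boundary list (alternative decomposition, same cost); on target_len = -1 A returns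
-- a spurious one-element list and B returns [] (stated as D_ below and proved tight).


-- ===== PORT A =====
-- literal port of A; frame_line_list[i] is pyGetD (always in range here: i < 5 = length);
-- Python 'x >> 1' is Lean's 'x >>> (1 : Nat)' (arithmetic shift, exact).
def fill_frame_line_list (frame_line_list : List Int) (target_len : Int) : List Int :=
  if frame_line_list.length = 5 then
    let scale := PySem.Int.floordiv target_len 5
    let offset := (target_len - scale * 5) >>> (1 : Nat)
    (PySem.List.pyRange 0 5 1).foldl (fun new_frame_line_list i =>
      let cur_scale : Int :=
        if i = 0 then scale + offset
        else if i = 4 then target_len - (new_frame_line_list.length : Int)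
        else scale
      (PySem.List.pyRange 0 cur_scale 1).foldl
        (fun acc _ => acc ++ [PySem.List.pyGetD frame_line_list i 0]) new_frame_line_list) []
  else frame_line_list

-- ===== PORT B =====
-- literal port of B (Source B): per-position bucket lookup; Python's sum of booleans is the sum of 0/1 terms.
def fill_frame_line_list_alt (frame_line_list : List Int) (target_len : Int) : List Int :=
  if frame_line_list.length ≠ 5 then frame_line_list
  else
    let scale := PySem.Int.floordiv target_len 5
    let offset := (target_len - scale * 5) >>> (1 : Nat)
    let bounds : List Int := [scale + offset, 2 * scale + offset, 3 * scale + offset, 4 * scale + offset]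
    (PySem.List.pyRange 0 target_len 1).map (fun k =>
      PySem.List.pyGetD frame_line_list ((bounds.map (fun b => if b ≤ k then (1 : Int) else 0)).sum) 0)

-- ===== PRECONDITION & SPEC =====
-- On 5-element lists with target_len = -1, A returns a one-element list holding the first frame
-- (a leftover of its offset arithmetic: scale = -1, offset = 2 make the first bucket size 1),
-- while B returns [], the intended output for a non-positive requested length (A itself returns
-- [] for every other negative target_len).
def D_fill_frame_line_list (frame_line_list : List Int) (target_len : Int) : Prop :=
  frame_line_list.length = 5 ∧ target_len = -1
instance (frame_line_list : List Int) (target_len : Int) : Decidable (D_fill_frame_line_list frame_line_list target_len) := by unfold D_fill_frame_line_list; infer_instance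

def Spec_fill_frame_line_list (frame_line_list : List Int) (target_len : Int) (out : List Int) : Prop := ¬ D_fill_frame_line_list frame_line_list target_len → out = fill_frame_line_list_alt frame_line_list target_len
instance (frame_line_list : List Int) (target_len : Int) (out : List Int) : Decidable (Spec_fill_frame_line_list frame_line_list target_len out) := by unfold Spec_fill_frame_line_list; infer_instance

def pvDiffWitness_fill_frame_line_list : List Int × Int := ([7, 1, 2, 3, 4], -1)
def pvDiffWitnessOut_fill_frame_line_list : (List Int) × (List Int) := ([7], [])

-- ===== CLAIM (what is proved, stated in full; the proofs are below) =====
def Claim_unchanged_fill_frame_line_list : Prop := ∀ (frame_line_list : List Int) (target_len : Int), Dom_fill_frame_line_list frame_line_list target_len → Spec_fill_frame_line_list frame_line_list target_len (fill_frame_line_list frame_line_list target_len)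
def Claim_changed_fill_frame_line_list : Prop := Dom_fill_frame_line_list (pvDiffWitness_fill_frame_line_list.1) (pvDiffWitness_fill_frame_line_list.2) ∧ D_fill_frame_line_list (pvDiffWitness_fill_frame_line_list.1) (pvDiffWitness_fill_frame_line_list.2) ∧ fill_frame_line_list (pvDiffWitness_fill_frame_line_list.1) (pvDiffWitness_fill_frame_line_list.2) = pvDiffWitnessOut_fill_frame_line_list.1 ∧ fill_frame_line_list_alt (pvDiffWitness_fill_frame_line_list.1) (pvDiffWitness_fill_frame_line_list.2) = pvDiffWitnessOut_fill_frame_line_list.2 ∧ pvDiffWitnessOut_fill_frame_line_list.1 ≠ pvDiffWitnessOut_fill_frame_line_list.2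
def Claim_exact_fill_frame_line_list : Prop := ∀ (frame_line_list : List Int) (target_len : Int), Dom_fill_frame_line_list frame_line_list target_len → D_fill_frame_line_list frame_line_list target_len → fill_frame_line_list frame_line_list target_len ≠ fill_frame_line_list_alt frame_line_list target_len

-- ===== LEMMAS AND PROOFS =====

-- appending a fixed element once per loop iteration is appending a replicate block
theorem pv_foldl_rep {β : Type} (L : List β) (x : Int) (acc : List Int) :
    L.foldl (fun a _ => a ++ [x]) acc = acc ++ List.replicate L.length x := by
  induction L generalizing acc with
  | nil => simp
  | cons y ys ih => simp [List.foldl_cons, ih, List.replicate_succ]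

theorem pv_rep_range (c : Int) (x : Int) (acc : List Int) :
    (PySem.List.pyRange 0 c 1).foldl (fun a _ => a ++ [x]) acc = acc ++ List.replicate c.toNat x := by
  rw [pv_foldl_rep, PySem.List.length_pyRange_one]
  norm_num

-- the offset expression shared by both ports, in ediv/emod form
theorem pv_off (t : Int) : (t - t / 5 * 5) >>> (1 : Nat) = t % 5 / 2 := by
  have h1 : t - t / 5 * 5 = t % 5 := by omega
  rw [h1]
  have h2 : (0 : Int) ≤ t % 5 := by omega
  have h3 : t % 5 < 5 := by omega
  interval_cases h : (t % 5) <;> decide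

-- A on a 5-element list, in closed form
theorem pv_A_unfold (a b c d e t : Int) :
    fill_frame_line_list [a, b, c, d, e] t =
      List.replicate (t/5 + t%5/2).toNat a ++ List.replicate (t/5).toNat b ++
        List.replicate (t/5).toNat c ++ List.replicate (t/5).toNat d ++
        List.replicate (t - ((((t/5 + t%5/2).toNat + 3 * (t/5).toNat : Nat)) : Int)).toNat e := by
  have hs : PySem.Int.floordiv t 5 = t / 5 := PySem.Int.floordiv_eq_ediv_of_pos (by norm_num)
  have h5 : PySem.List.pyRange 0 5 1 = [0, 1, 2, 3, 4] := by decide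
  simp only [fill_frame_line_list, List.length_cons, List.length_nil, h5,
    List.foldl_cons, List.foldl_nil, hs, pv_off]
  norm_num [pv_rep_range, show PySem.List.pyGetD [a,b,c,d,e] (1:Int) 0 = b from rfl,
    show PySem.List.pyGetD [a,b,c,d,e] (2:Int) 0 = c from rfl,
    show PySem.List.pyGetD [a,b,c,d,e] (3:Int) 0 = d from rfl,
    show PySem.List.pyGetD [a,b,c,d,e] (4:Int) 0 = e from rfl]
  congr 4
  omega

-- B on a 5-element list, with the range and the boolean sum made explicit
theorem pv_B_unfold (a b c d e t : Int) :
    fill_frame_line_list_alt [a, b, c, d, e] t =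
      (List.range t.toNat).map (fun k : Nat =>
        PySem.List.pyGetD [a, b, c, d, e]
          (((if t/5 + t%5/2 ≤ (k:Int) then (1:Int) else 0) +
            ((if 2*(t/5) + t%5/2 ≤ (k:Int) then (1:Int) else 0) +
             ((if 3*(t/5) + t%5/2 ≤ (k:Int) then (1:Int) else 0) +
              ((if 4*(t/5) + t%5/2 ≤ (k:Int) then (1:Int) else 0) + 0))))) 0) := by
  have hs : PySem.Int.floordiv t 5 = t / 5 := PySem.Int.floordiv_eq_ediv_of_pos (by norm_num)
  unfold fill_frame_line_list_alt
  simp only [List.length_cons, List.length_nil, hs, pv_off, List.map_cons, List.map_nil,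
    List.sum_cons, List.sum_nil, PySem.List.pyRange_one, List.map_map]
  norm_num

-- the two closed forms agree for every t ≠ -1
theorem pv_main (a b c d e t : Int) (ht : t ≠ -1) :
    (List.replicate (t/5 + t%5/2).toNat a ++ List.replicate (t/5).toNat b ++
        List.replicate (t/5).toNat c ++ List.replicate (t/5).toNat d ++
        List.replicate (t - ((((t/5 + t%5/2).toNat + 3 * (t/5).toNat : Nat)) : Int)).toNat e) =
      (List.range t.toNat).map (fun k : Nat =>
        PySem.List.pyGetD [a, b, c, d, e]
          (((if t/5 + t%5/2 ≤ (k:Int) then (1:Int) else 0) +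
            ((if 2*(t/5) + t%5/2 ≤ (k:Int) then (1:Int) else 0) +
             ((if 3*(t/5) + t%5/2 ≤ (k:Int) then (1:Int) else 0) +
              ((if 4*(t/5) + t%5/2 ≤ (k:Int) then (1:Int) else 0) + 0))))) 0) := by
  by_cases h : t ≤ 0
  · have h1 : (t/5 + t%5/2).toNat = 0 := by omega
    have h2 : (t/5).toNat = 0 := by omega
    have h3 : t.toNat = 0 := by omega
    simp [h1, h2, h3]
  · replace h : 0 < t := by omega
    apply List.ext_getElem
    · simp only [List.length_append, List.length_replicate, List.length_map, List.length_range]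
      omega
    · intro k hk1 hk2
      simp only [List.getElem_map, List.getElem_range, List.getElem_append,
        List.length_append, List.length_replicate, List.getElem_replicate]
      have hkt : k < t.toNat := by simpa using hk2
      split_ifs <;> first | rfl | omega

theorem pv_aux (a b c d e t : Int) (ht : t ≠ -1) :
    fill_frame_line_list [a, b, c, d, e] t = fill_frame_line_list_alt [a, b, c, d, e] t := by
  rw [pv_A_unfold, pv_B_unfold]
  exact pv_main a b c d e t ht

-- ===== VERDICT (by name: the statement is the Claim_ definition above) =====
theorem fill_frame_line_list_spec : Claim_unchanged_fill_frame_line_list := by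
  intro l t _ hD
  by_cases h5 : l.length = 5
  · match l, h5 with
    | [a, b, c, d, e], _ =>
      have ht : t ≠ -1 := fun h => hD ⟨rfl, h⟩
      exact pv_aux a b c d e t ht
  · unfold fill_frame_line_list fill_frame_line_list_alt
    simp [h5]

theorem fill_frame_line_list_changed : Claim_changed_fill_frame_line_list := by
  unfold Claim_changed_fill_frame_line_list; decide

theorem fill_frame_line_list_tight : Claim_exact_fill_frame_line_list := by
  intro l t _ hD
  obtain ⟨h5, ht⟩ := hD
  subst ht
  match l, h5 with
  | [a, b, c, d, e], _ =>
    intro h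
    have hA : fill_frame_line_list [a, b, c, d, e] (-1) = [a] := by rfl
    have hB : fill_frame_line_list_alt [a, b, c, d, e] (-1) = [] := by rfl
    rw [hA, hB] at h
    exact List.cons_ne_nil a [] h
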